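-- pv_equiv track=rewrite | github.com/Jmarquez1511/EN.602.602-DataStructures | EN605202_Lab2_JoseMarquezJaramillo/SourceCode/infixcheck.py | is_prefix_valid
-- ===== SOURCE A (Python) =====
-- def is_prefix_valid(expression_: list) -> bool:
--     """
--     Helper function to determine if the prefix expression is a valid one or not. In order for a prefix expression to be
--     valid it must meet:
--     1. The total number of operands is one more than the number of operators.
--     2. Any prefix of the expression not including the last two symbols must contain no less operators than operands.
--     This function is later used in prefix_to_postfix() to not try and evaluate invalid prefix expressions
--     :param expression_: str
--     :return: bool
--     """
--     valid_symbols = ['+', '-', '*', '/', '$']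
--     operands = list()
--     operators = list()
--
--     # Check if The total number of operands is one more than the number of operators
--     # otherwise return false
--     for i in range(len(expression_)-1, -1, -1):
--         symbol = expression_[i]
--         if symbol in valid_symbols:
--             operators.append(symbol)
--         elif symbol.isalpha():
--             operands.append(symbol)
--     if len(operands) != (1 + len(operators)):
--         return False
--
--     # Check if any prefix of the expression not including the last two symbols must contain no less
--     # operators than operands, otherwise return false
--     operands_ = list()
--     operators_ = list()
--     for i in range(len(expression_)-3, -1, -1):
--         symbol = expression_[i]
--         if symbol in valid_symbols:
--             operators_.append(symbol)
--         elif symbol.isalpha():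
--             operands_.append(symbol)
--     if len(operators_) <= len(operands_):
--         return False
--     else:
--         return True
-- ===== SOURCE B (Python) =====
-- def is_prefix_valid(expression_: list) -> bool:
--     valid_symbols = {'+', '-', '*', '/', '$'}
--     operators = 0
--     operands = 0
--     for symbol in expression_:
--         if symbol in valid_symbols:
--             operators += 1
--         elif symbol.isalpha():
--             operands += 1
--     if operands != operators + 1:
--         return False
--     for symbol in expression_[max(0, len(expression_) - 2):]:
--         if symbol in valid_symbols:
--             operators -= 1
--         elif symbol.isalpha():
--             operands -= 1
--     return operators > operands
-- ===== Notes on version B (the rewrite author's own statement) =====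
-- stated objective: simpler
-- what changed: B replaces A's two reverse index-loops that build operand/operator lists with one forward counting pass over the whole expression, deriving the all-but-last-two counts by subtracting the classification of the final (up to two) symbols instead of rescanning.
import Mathlib
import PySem

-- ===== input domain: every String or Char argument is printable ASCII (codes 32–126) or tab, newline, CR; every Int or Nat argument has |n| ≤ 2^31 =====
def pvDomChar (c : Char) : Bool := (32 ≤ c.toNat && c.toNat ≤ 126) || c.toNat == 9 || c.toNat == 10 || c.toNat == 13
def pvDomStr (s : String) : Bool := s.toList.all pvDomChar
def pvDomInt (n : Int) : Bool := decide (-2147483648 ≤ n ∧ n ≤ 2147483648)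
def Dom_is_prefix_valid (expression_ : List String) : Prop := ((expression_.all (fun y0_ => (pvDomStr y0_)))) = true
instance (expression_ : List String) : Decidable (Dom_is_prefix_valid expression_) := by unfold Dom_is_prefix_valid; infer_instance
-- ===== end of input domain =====

-- B change (one line): B is one forward counting pass plus a subtraction of the last up-to-two
-- symbols' classification, instead of A's two reverse index-loops building lists (objective: simpler).

-- ===== PORT A =====
-- the shared symbol table of A (and reused, as a set in Source B, by B)
def pvValidSymbols : List String := ["+", "-", "*", "/", "$"]

def is_prefix_valid (expression_ : List String) : Bool :=
  let n : Int := PySem.List.len expression_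
  -- first loop: for i in range(len-1, -1, -1), appending to operands/operators lists
  let st1 := (PySem.List.pyRange (n - 1) (-1) (-1)).foldl
    (fun (acc : List String × List String) i =>
      let symbol := PySem.List.pyGetD expression_ i ""
      if pvValidSymbols.contains symbol then (acc.1, acc.2 ++ [symbol])
      else if PySem.Str.strIsalpha symbol then (acc.1 ++ [symbol], acc.2)
      else acc) ([], [])
  if st1.1.length ≠ 1 + st1.2.length then false
  else
    -- second loop: for i in range(len-3, -1, -1)
    let st2 := (PySem.List.pyRange (n - 3) (-1) (-1)).foldl
      (fun (acc : List String × List String) i =>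
        let symbol := PySem.List.pyGetD expression_ i ""
        if pvValidSymbols.contains symbol then (acc.1, acc.2 ++ [symbol])
        else if PySem.Str.strIsalpha symbol then (acc.1 ++ [symbol], acc.2)
        else acc) ([], [])
    if st2.2.length ≤ st2.1.length then false else true

-- ===== PORT B =====
def is_prefix_valid_alt (expression_ : List String) : Bool :=
  -- one forward pass counting (operators, operands)
  let c := expression_.foldl
    (fun (acc : Int × Int) symbol =>
      if pvValidSymbols.contains symbol then (acc.1 + 1, acc.2)
      else if PySem.Str.strIsalpha symbol then (acc.1, acc.2 + 1)
      else acc) ((0 : Int), (0 : Int))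
  if c.2 ≠ c.1 + 1 then false
  else
    -- subtract the classification of expression_[max(0, len-2):]
    let tail := PySem.List.slice expression_
      (some (max 0 (PySem.List.len expression_ - 2))) none
    let c' := tail.foldl
      (fun (acc : Int × Int) symbol =>
        if pvValidSymbols.contains symbol then (acc.1 - 1, acc.2)
        else if PySem.Str.strIsalpha symbol then (acc.1, acc.2 - 1)
        else acc) c
    decide (c'.1 > c'.2)

-- ===== PRECONDITION & SPEC =====
def Spec_is_prefix_valid (expression_ : List String) (out : Bool) : Prop := out = is_prefix_valid_alt expression_
instance (expression_ : List String) (out : Bool) : Decidable (Spec_is_prefix_valid expression_ out) := by unfold Spec_is_prefix_valid; infer_instance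

-- ===== CLAIM (what is proved, stated in full; the proofs are below) =====
def Claim_equal_is_prefix_valid : Prop := ∀ (expression_ : List String), Dom_is_prefix_valid expression_ → Spec_is_prefix_valid expression_ (is_prefix_valid expression_)

-- ===== LEMMAS AND PROOFS =====

-- classification predicates used only by the proofs
def pvOp (s : String) : Bool := pvValidSymbols.contains s
def pvAl (s : String) : Bool := !pvValidSymbols.contains s && PySem.Str.strIsalpha s

-- A's index loop: the pair of appended lists is (filter pvAl, filter pvOp) of the visited symbols
theorem pv_foldl_idx_pair (e : List String) (idxs : List Int) (a b : List String) :
    idxs.foldl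
      (fun (acc : List String × List String) i =>
        if pvValidSymbols.contains (PySem.List.pyGetD e i "") then
          (acc.1, acc.2 ++ [PySem.List.pyGetD e i ""])
        else if PySem.Str.strIsalpha (PySem.List.pyGetD e i "") then
          (acc.1 ++ [PySem.List.pyGetD e i ""], acc.2)
        else acc) (a, b)
    = (a ++ (idxs.map (fun i => PySem.List.pyGetD e i "")).filter pvAl,
       b ++ (idxs.map (fun i => PySem.List.pyGetD e i "")).filter pvOp) := by
  induction idxs generalizing a b with
  | nil => simp
  | cons x t ih =>
    simp only [List.foldl_cons, List.map_cons, List.filter_cons]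
    by_cases hp : pvValidSymbols.contains (PySem.List.pyGetD e x "") = true
    · have hm : PySem.List.pyGetD e x "" ∈ pvValidSymbols := by simpa using hp
      have h1 : pvOp (PySem.List.pyGetD e x "") = true := hp
      have h2 : pvAl (PySem.List.pyGetD e x "") = false := by simp [pvAl, hm]
      rw [if_pos hp, ih, h1, h2]
      simp
    · by_cases ha : PySem.Str.strIsalpha (PySem.List.pyGetD e x "") = true
      · have hm : PySem.List.pyGetD e x "" ∉ pvValidSymbols := by simpa using hp
        have h1 : pvOp (PySem.List.pyGetD e x "") = false := by simp [pvOp, hm]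
        have h2 : pvAl (PySem.List.pyGetD e x "") = true := by
          have ha' : PySem.Chars.strIsalpha (PySem.List.pyGetD e x "").toList = true := by simpa using ha
          simp [pvAl, hm, ha']
        rw [if_neg hp, if_pos ha, ih, h1, h2]
        simp
      · have h2 : pvAl (PySem.List.pyGetD e x "") = false := by
          have ha' : ¬ PySem.Chars.strIsalpha (PySem.List.pyGetD e x "").toList = true := by simpa using ha
          simp [pvAl, ha']
        have hm : PySem.List.pyGetD e x "" ∉ pvValidSymbols := by simpa using hp
        have h1 : pvOp (PySem.List.pyGetD e x "") = false := by simp [pvOp, hm]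
        rw [if_neg hp, if_neg ha, ih, h1, h2]
        simp

-- B's forward pass: counts are the numbers of pvOp / pvAl symbols
theorem pv_fold_count (l : List String) (a b : Int) :
    l.foldl
      (fun (acc : Int × Int) symbol =>
        if pvValidSymbols.contains symbol then (acc.1 + 1, acc.2)
        else if PySem.Str.strIsalpha symbol then (acc.1, acc.2 + 1)
        else acc) (a, b)
    = (a + (l.filter pvOp).length, b + (l.filter pvAl).length) := by
  induction l generalizing a b with
  | nil => simp
  | cons x t ih =>
    simp only [List.foldl_cons, List.filter_cons]
    by_cases hp : pvValidSymbols.contains x = true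
    · have hm : x ∈ pvValidSymbols := by simpa using hp
      have h1 : pvOp x = true := hp
      have h2 : pvAl x = false := by simp [pvAl, hm]
      rw [if_pos hp, ih, h1, h2]
      simp only [if_true, List.length_cons, Prod.mk.injEq]
      constructor <;> push_cast <;> ring
    · by_cases ha : PySem.Str.strIsalpha x = true
      · have hm : x ∉ pvValidSymbols := by simpa using hp
        have h1 : pvOp x = false := by simp [pvOp, hm]
        have h2 : pvAl x = true := by
          have ha' : PySem.Chars.strIsalpha x.toList = true := by simpa using ha
          simp [pvAl, hm, ha']
        rw [if_neg hp, if_pos ha, ih, h1, h2]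
        simp only [if_true, List.length_cons, Prod.mk.injEq]
        constructor <;> push_cast <;> ring
      · have h2 : pvAl x = false := by
          have ha' : ¬ PySem.Chars.strIsalpha x.toList = true := by simpa using ha
          simp [pvAl, ha']
        have hm : x ∉ pvValidSymbols := by simpa using hp
        have h1 : pvOp x = false := by simp [pvOp, hm]
        rw [if_neg hp, if_neg ha, ih, h1, h2]
        simp

-- B's subtraction pass
theorem pv_fold_count_sub (l : List String) (a b : Int) :
    l.foldl
      (fun (acc : Int × Int) symbol =>
        if pvValidSymbols.contains symbol then (acc.1 - 1, acc.2)
        else if PySem.Str.strIsalpha symbol then (acc.1, acc.2 - 1)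
        else acc) (a, b)
    = (a - (l.filter pvOp).length, b - (l.filter pvAl).length) := by
  induction l generalizing a b with
  | nil => simp
  | cons x t ih =>
    simp only [List.foldl_cons, List.filter_cons]
    by_cases hp : pvValidSymbols.contains x = true
    · have hm : x ∈ pvValidSymbols := by simpa using hp
      have h1 : pvOp x = true := hp
      have h2 : pvAl x = false := by simp [pvAl, hm]
      rw [if_pos hp, ih, h1, h2]
      simp only [if_true, List.length_cons, Prod.mk.injEq]
      constructor <;> push_cast <;> ring
    · by_cases ha : PySem.Str.strIsalpha x = true
      · have hm : x ∉ pvValidSymbols := by simpa using hp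
        have h1 : pvOp x = false := by simp [pvOp, hm]
        have h2 : pvAl x = true := by
          have ha' : PySem.Chars.strIsalpha x.toList = true := by simpa using ha
          simp [pvAl, hm, ha']
        rw [if_neg hp, if_pos ha, ih, h1, h2]
        simp only [if_true, List.length_cons, Prod.mk.injEq]
        constructor <;> push_cast <;> ring
      · have h2 : pvAl x = false := by
          have ha' : ¬ PySem.Chars.strIsalpha x.toList = true := by simpa using ha
          simp [pvAl, ha']
        have hm : x ∉ pvValidSymbols := by simpa using hp
        have h1 : pvOp x = false := by simp [pvOp, hm]
        rw [if_neg hp, if_neg ha, ih, h1, h2]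
        simp

-- mapping pyGetD over a prefix range of indices yields the prefix of the list
theorem pv_map_range (e : List String) (m : Nat) (h : m ≤ e.length) :
    (PySem.List.pyRange 0 (m : Int) 1).map (fun j => PySem.List.pyGetD e j "") = e.take m := by
  induction m with
  | zero => simp [PySem.List.pyRange_one_eq_nil]
  | succ k ih =>
    have hk : (0 : Int) ≤ (k : Int) := by omega
    have hcast : ((k + 1 : Nat) : Int) = (k : Int) + 1 := by push_cast; ring
    rw [hcast, PySem.List.pyRange_one_succ_right hk, List.map_append,
      ih (by omega)]
    have hlt : k < e.length := by omega
    rw [List.map_singleton, PySem.List.pyGetD_natCast, List.getD_eq_getElem?_getD,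
      List.getElem?_eq_getElem hlt]
    simp

theorem is_prefix_valid_eq (e : List String) :
    is_prefix_valid e = is_prefix_valid_alt e := by
  have hn : PySem.List.len e = (e.length : Int) := by simp [PySem.List.len_eq]
  have hr1 : PySem.List.pyRange ((e.length : Int) - 1) (-1) (-1)
      = (PySem.List.pyRange 0 (e.length : Int) 1).reverse := by
    have h := PySem.List.pyRange_neg_one_eq_reverse ((e.length : Int) - 1) (-1)
    rw [show ((-1 : Int) + 1) = 0 by ring, show ((e.length : Int) - 1 + 1) = (e.length : Int) by ring] at h
    exact h
  have hr2 : PySem.List.pyRange ((e.length : Int) - 3) (-1) (-1)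
      = (PySem.List.pyRange 0 ((e.length : Int) - 2) 1).reverse := by
    have h := PySem.List.pyRange_neg_one_eq_reverse ((e.length : Int) - 3) (-1)
    rw [show ((-1 : Int) + 1) = 0 by ring, show ((e.length : Int) - 3 + 1) = (e.length : Int) - 2 by ring] at h
    exact h
  have hmap1 : (PySem.List.pyRange 0 (e.length : Int) 1).map
      (fun j => PySem.List.pyGetD e j "") = e := by
    simpa using pv_map_range e e.length (le_refl e.length)
  have hmap2 : (PySem.List.pyRange 0 ((e.length : Int) - 2) 1).map
      (fun j => PySem.List.pyGetD e j "") = e.take (e.length - 2) := by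
    by_cases h2 : 2 ≤ e.length
    · have hc : ((e.length : Int) - 2) = ((e.length - 2 : Nat) : Int) := by omega
      rw [hc, pv_map_range e (e.length - 2) (by omega)]
    · have hnil : PySem.List.pyRange 0 ((e.length : Int) - 2) 1 = [] :=
        PySem.List.pyRange_one_eq_nil (by omega)
      have hlen : e.length - 2 = 0 := by omega
      simp [hnil, hlen]
  have htail : PySem.List.slice e (some (max 0 ((e.length : Int) - 2))) none
      = e.drop (e.length - 2) := by
    rw [PySem.List.slice_from e (le_max_left 0 ((e.length : Int) - 2))]
    congr 1
    omega
  -- split the whole-list filters at position (length - 2)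
  have hPsplit : ((e.take (e.length - 2)).filter pvOp).length
      + ((e.drop (e.length - 2)).filter pvOp).length = (e.filter pvOp).length := by
    rw [← List.length_append, ← List.filter_append, List.take_append_drop]
  have hQsplit : ((e.take (e.length - 2)).filter pvAl).length
      + ((e.drop (e.length - 2)).filter pvAl).length = (e.filter pvAl).length := by
    rw [← List.length_append, ← List.filter_append, List.take_append_drop]
  simp only [is_prefix_valid, is_prefix_valid_alt, hn, hr1, hr2, htail,
    pv_foldl_idx_pair, pv_fold_count, pv_fold_count_sub, List.map_reverse,
    hmap1, hmap2, List.filter_reverse, List.length_reverse, List.nil_append]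
  split_ifs with h1 h2 h3 h4 <;>
    first
      | rfl
      | (exfalso; omega)
      | (symm; rw [decide_eq_true_eq]; omega)
      | (symm; rw [decide_eq_false_iff_not]; omega)

-- ===== VERDICT (by name: the statement is the Claim_ definition above) =====
theorem is_prefix_valid_spec : Claim_equal_is_prefix_valid := by
  intro e _
  unfold Spec_is_prefix_valid
  exact is_prefix_valid_eq e
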